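-- pv_equiv track=rewrite | github.com/minsangKang/CodingTest | 2.py | calculate
-- ===== SOURCE A (Python) =====
-- def calculate(aSums, bSums):
--     aWin, aLose = 0, 0
--     for a in aSums:
--         for b in bSums:
--             if a > b:
--                 aWin += 1
--             elif a < b:
--                 aLose += 1
--     return (aWin, aLose)
-- ===== SOURCE B (Python) =====
-- def _bisect_left(bs, x):
--     # standard bisect_left algorithm (bisect module is not importable here)
--     lo, hi = 0, len(bs)
--     while lo < hi:
--         mid = (lo + hi) // 2
--         if bs[mid] < x:
--             lo = mid + 1
--         else:
--             hi = mid
--     return lo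
--
--
-- def _bisect_right(bs, x):
--     lo, hi = 0, len(bs)
--     while lo < hi:
--         mid = (lo + hi) // 2
--         if x < bs[mid]:
--             hi = mid
--         else:
--             lo = mid + 1
--     return lo
--
--
-- def calculate(aSums, bSums):
--     bs = sorted(bSums)
--     n = len(bs)
--     aWin = 0
--     aLose = 0
--     for a in aSums:
--         aWin += _bisect_left(bs, a)      # elements of bSums below a
--         aLose += n - _bisect_right(bs, a)  # elements of bSums above a
--     return (aWin, aLose)
-- ===== Notes on version B (the rewrite author's own statement) =====
-- stated objective: faster
-- what changed: Replaced the nested per-pair comparison loops with sorting bSums once and, for each a, counting smaller/larger elements via hand-written binary searches (bisect_left/bisect_right).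
import Mathlib
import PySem

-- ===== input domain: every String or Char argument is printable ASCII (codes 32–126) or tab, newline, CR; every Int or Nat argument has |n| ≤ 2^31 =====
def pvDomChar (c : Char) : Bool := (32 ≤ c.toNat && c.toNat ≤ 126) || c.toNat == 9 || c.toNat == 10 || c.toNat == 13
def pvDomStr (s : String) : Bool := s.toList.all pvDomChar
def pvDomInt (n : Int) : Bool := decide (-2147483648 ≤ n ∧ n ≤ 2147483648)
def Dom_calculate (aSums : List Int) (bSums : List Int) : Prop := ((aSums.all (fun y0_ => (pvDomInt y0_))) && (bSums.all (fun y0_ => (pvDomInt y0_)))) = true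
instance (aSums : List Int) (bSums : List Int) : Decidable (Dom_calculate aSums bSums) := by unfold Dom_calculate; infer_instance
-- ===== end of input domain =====

-- B replaces A's nested O(n*m) pair scan by sorting bSums once and counting smaller/larger
-- elements with binary search (O((n+m) log m)); objective: faster.


-- ===== PORT A =====
-- Python A returns the tuple (aWin, aLose); per the task signature it is delivered as [aWin, aLose].
def calculate (aSums : List Int) (bSums : List Int) : List Int :=
  let r := aSums.foldl (fun (s : Int × Int) a =>
    bSums.foldl (fun (t : Int × Int) b =>
      if a > b then (t.1 + 1, t.2)
      else if a < b then (t.1, t.2 + 1)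
      else t) s) (0, 0)
  [r.1, r.2]

-- ===== PORT B =====
-- Source B's hand-written _bisect_left/_bisect_right are the standard bisect algorithm,
-- ported as the prelude's PySem.List.bisectLeft / bisectRight (the same loop).
def calculate_alt (aSums : List Int) (bSums : List Int) : List Int :=
  let bs := PySem.List.sorted bSums (fun x => x) false
  let n : Int := bs.length
  let r := aSums.foldl (fun (s : Int × Int) a =>
    (s.1 + (PySem.List.bisectLeft bs a : Int),
     s.2 + (n - (PySem.List.bisectRight bs a : Int)))) (0, 0)
  [r.1, r.2]

-- ===== PRECONDITION & SPEC =====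
def Spec_calculate (aSums : List Int) (bSums : List Int) (out : List Int) : Prop := out = calculate_alt aSums bSums
instance (aSums : List Int) (bSums : List Int) (out : List Int) : Decidable (Spec_calculate aSums bSums out) := by unfold Spec_calculate; infer_instance

-- ===== CLAIM (what is proved, stated in full; the proofs are below) =====
def Claim_equal_calculate : Prop := ∀ (aSums : List Int) (bSums : List Int), Dom_calculate aSums bSums → Spec_calculate aSums bSums (calculate aSums bSums)

-- ===== LEMMAS AND PROOFS =====

-- If a predicate holds exactly on the first r positions of a list, countP = r.
theorem pv_countP_of_prefix (p : Int → Bool) :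
    ∀ (bs : List Int) (r : Nat), r ≤ bs.length →
      (∀ j (hj : j < bs.length), p bs[j] = true ↔ j < r) → bs.countP p = r := by
  intro bs
  induction bs with
  | nil => intro r hr _; simpa using (Nat.le_zero.mp hr).symm
  | cons b tl ih =>
    intro r hr hch
    cases r with
    | zero =>
      have hall : ∀ x ∈ b :: tl, ¬ p x = true := by
        intro x hx
        rcases List.mem_iff_getElem.mp hx with ⟨j, hj, rfl⟩
        intro hp
        exact Nat.not_lt_zero j ((hch j hj).mp hp)
      simp [List.countP_eq_zero.mpr hall]
    | succ s =>
      have hb : p b = true := (hch 0 (by simp)).mpr (Nat.succ_pos s)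
      have htl : tl.countP p = s := by
        apply ih s (by simpa using hr)
        intro j hj
        have := hch (j+1) (by simpa using Nat.succ_lt_succ hj)
        simpa [Nat.succ_lt_succ_iff] using this
      simp [hb, htl]

-- On a sorted list, bisect_left counts the elements < x.
theorem pv_bisectLeft_eq_countP (bs : List Int) (x : Int)
    (h : bs.Pairwise (· ≤ ·)) :
    PySem.List.bisectLeft bs x = bs.countP (fun b => decide (b < x)) := by
  obtain ⟨hle, hlt, hge⟩ := PySem.List.bisectLeft_spec bs x h
  refine (pv_countP_of_prefix _ bs _ hle ?_).symm
  intro j hj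
  constructor
  · intro hp
    by_contra hnot
    exact absurd (of_decide_eq_true hp) (not_lt.mpr (hge j hj (Nat.le_of_not_lt hnot)))
  · intro hjr
    exact decide_eq_true (hlt j hj hjr)

-- On a sorted list, bisect_right counts the elements ≤ x.
theorem pv_bisectRight_eq_countP (bs : List Int) (x : Int)
    (h : bs.Pairwise (· ≤ ·)) :
    PySem.List.bisectRight bs x = bs.countP (fun b => decide (b ≤ x)) := by
  obtain ⟨hle, hlt, hge⟩ := PySem.List.bisectRight_spec bs x h
  refine (pv_countP_of_prefix _ bs _ hle ?_).symm
  intro j hj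
  constructor
  · intro hp
    by_contra hnot
    exact absurd (of_decide_eq_true hp) (not_le.mpr (hge j hj (Nat.le_of_not_lt hnot)))
  · intro hjr
    exact decide_eq_true (hlt j hj hjr)

-- A's inner loop over bSums adds the two counts to the accumulator.
theorem pv_innerA (a : Int) :
    ∀ (bs : List Int) (w l : Int),
      bs.foldl (fun (t : Int × Int) b =>
        if a > b then (t.1 + 1, t.2)
        else if a < b then (t.1, t.2 + 1)
        else t) (w, l)
      = (w + (bs.countP (fun b => decide (b < a)) : Int),
         l + (bs.countP (fun b => decide (a < b)) : Int)) := by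
  intro bs
  induction bs with
  | nil => intro w l; simp
  | cons b tl ih =>
    intro w l
    by_cases h1 : a > b
    · simp [List.foldl_cons, h1, ih, h1.le.not_gt]
      omega
    · by_cases h2 : a < b
      · simp [List.foldl_cons, h1, h2, ih]
        omega
      · simp [List.foldl_cons, h1, h2, ih]

theorem calculate_spec : Claim_equal_calculate := by
  intro aSums bSums _
  show calculate aSums bSums = calculate_alt aSums bSums
  unfold calculate calculate_alt
  set bs := PySem.List.sorted bSums (fun x => x) false with hbs
  have hperm : bs.Perm bSums := PySem.List.sorted_perm bSums (fun x => x) false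
  have hsorted : bs.Pairwise (· ≤ ·) := PySem.List.sorted_pairwise bSums (fun x => x)
  -- the two folds over aSums agree step by step, from any accumulator
  have key : ∀ (as : List Int) (w l : Int),
      as.foldl (fun (s : Int × Int) a =>
        bSums.foldl (fun (t : Int × Int) b =>
          if a > b then (t.1 + 1, t.2)
          else if a < b then (t.1, t.2 + 1)
          else t) s) (w, l)
      = as.foldl (fun (s : Int × Int) a =>
        (s.1 + (PySem.List.bisectLeft bs a : Int),
         s.2 + ((bs.length : Int) - (PySem.List.bisectRight bs a : Int)))) (w, l) := by
    intro as
    induction as with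
    | nil => intro w l; rfl
    | cons a tl ih =>
      intro w l
      rw [List.foldl_cons, List.foldl_cons, pv_innerA]
      have hlt : PySem.List.bisectLeft bs a = bSums.countP (fun b => decide (b < a)) := by
        rw [pv_bisectLeft_eq_countP bs a hsorted, hperm.countP_eq]
      have hgt : (bs.length : Int) - (PySem.List.bisectRight bs a : Int)
          = (bSums.countP (fun b => decide (a < b)) : Int) := by
        rw [pv_bisectRight_eq_countP bs a hsorted]
        have hsplit : bs.length = bs.countP (fun b => decide (b ≤ a))
            + bs.countP (fun b => decide (a < b)) := by
          have := List.length_eq_countP_add_countP (fun b => decide (b ≤ a)) (l := bs)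
          simpa [not_le] using this
        rw [← hperm.countP_eq (fun b => decide (a < b))]
        omega
      rw [ih, hlt, hgt]
  simp only [key]
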